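-- pv_equiv track=rewrite | github.com/atharvai812/CP | 6th Chapter/tree labeling.py | rec
-- ===== SOURCE A (Python) =====
-- def cbin(n, k):
--     if k > n // 2:
--         k = n - k
--     top = 1
--     bot = 1
--     for i in range(2, k + 1):
--         bot *= i
--     for i in range(n - k + 1, n + 1):
--         top *= i
--     return top // bot
--
-- def rec(t, b):
--     res = 1
--     if b > 1:
--         dif = t // b
--         if dif == 1:
--             for i in range(2, b + 1):
--                 res *= i
--         else:
--             for _ in range(b - 1):
--                 res *= cbin(t, dif)
--             t -= dif
--             res *= rec(dif - 1, b) ** b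
--     return res
-- ===== SOURCE B (Python) =====
-- def _choose(n, k):
--     # binomial coefficient, one combined loop for numerator and denominator
--     if k > n // 2:
--         k = n - k
--     top = 1
--     bot = 1
--     for i in range(1, k + 1):
--         top *= n - k + i
--         bot *= i
--     return top // bot
--
-- def rec(t, b):
--     if b <= 1:
--         return 1
--     # descend iteratively, collecting one binomial factor per level
--     factors = []
--     while True:
--         dif = t // b
--         if dif == 1:
--             res = 1
--             for i in range(2, b + 1):
--                 res *= i
--             break
--         factors.append(_choose(t, dif))
--         t = dif - 1
--     # rebuild the answer back-to-front: one exponentiation per level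
--     for c in reversed(factors):
--         res = c ** (b - 1) * res ** b
--     return res
-- ===== Notes on version B (the rewrite author's own statement) =====
-- stated objective: alternative
-- what changed: B computes the level's binomial coefficient once and raises it to the power b-1 instead of recomputing it b-1 times in a loop, replaces the recursion by an iterative descent collecting one factor per level and folding them back-to-front, and computes the binomial with a single combined numerator/denominator loop; it trades A's repeated identical binomial computations for one computation plus an exponentiation per level (not measurably faster on the timed inputs); …
import Mathlib
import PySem

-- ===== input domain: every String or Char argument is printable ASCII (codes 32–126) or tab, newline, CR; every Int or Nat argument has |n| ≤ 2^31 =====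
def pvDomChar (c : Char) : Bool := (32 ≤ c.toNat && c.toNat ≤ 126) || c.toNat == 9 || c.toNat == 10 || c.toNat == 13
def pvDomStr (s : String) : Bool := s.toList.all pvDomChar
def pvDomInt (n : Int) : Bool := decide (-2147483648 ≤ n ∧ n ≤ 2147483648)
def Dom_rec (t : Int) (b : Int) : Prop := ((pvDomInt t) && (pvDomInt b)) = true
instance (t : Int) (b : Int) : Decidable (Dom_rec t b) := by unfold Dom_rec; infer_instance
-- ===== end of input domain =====

-- B replaces A's per-level loop of b-1 identical binomial computations (recomputed from
-- scratch each iteration) by ONE binomial computation and an exponentiation, and replaces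
-- the recursion by an iterative descent that collects one factor per level and rebuilds
-- the answer back-to-front; objective: alternative (a different per-level computation).

-- ===== PORT A =====
def cbin (n k : Int) : Int :=
  let k := if k > PySem.Int.floordiv n 2 then n - k else k
  let bot := (PySem.List.pyRange 2 (k + 1) 1).foldl (fun r i => r * i) 1
  let top := (PySem.List.pyRange (n - k + 1) (n + 1) 1).foldl (fun r i => r * i) 1
  PySem.Int.floordiv top bot

-- A's recursion does not terminate on all Int inputs (Python hits RecursionError there),
-- so the port carries a fuel counter; on Pre_rec inputs inside Dom the depth is < 32, so
-- fuel 64 is never exhausted there.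
def recFuel : Nat → Int → Int → Int
  | 0, _, _ => 0
  | fuel + 1, t, b =>
    if b > 1 then
      let dif := PySem.Int.floordiv t b
      if dif = 1 then
        (PySem.List.pyRange 2 (b + 1) 1).foldl (fun r i => r * i) 1
      else
        ((PySem.List.pyRange 0 (b - 1) 1).foldl (fun r _ => r * cbin t dif) 1) *
          (recFuel fuel (dif - 1) b) ^ b.toNat
    else 1

def rec (t : Int) (b : Int) : Int := recFuel 64 t b

-- ===== PORT B =====
def chooseB (n k : Int) : Int :=
  let k := if k > PySem.Int.floordiv n 2 then n - k else k
  let p := (PySem.List.pyRange 1 (k + 1) 1).foldl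
      (fun (p : Int × Int) i => (p.1 * (n - k + i), p.2 * i)) (1, 1)
  PySem.Int.floordiv p.1 p.2

-- the 'while True' descent of Source B, fueled like A's recursion: returns the collected
-- factors (outermost first) and the factorial computed at the bottom level
def chainB : Nat → Int → Int → List Int × Int
  | 0, _, _ => ([], 0)
  | fuel + 1, t, b =>
    let dif := PySem.Int.floordiv t b
    if dif = 1 then
      ([], (PySem.List.pyRange 2 (b + 1) 1).foldl (fun r i => r * i) 1)
    else
      let s := chainB fuel (dif - 1) b
      (chooseB t dif :: s.1, s.2)

def rec_alt (t : Int) (b : Int) : Int :=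
  if b ≤ 1 then 1
  else
    let s := chainB 64 t b
    s.1.reverse.foldl (fun res c => c ^ (b - 1).toNat * res ^ b.toNat) s.2

-- ===== PRECONDITION & SPEC =====
-- Pre_rec excludes exactly the inputs on which A's recursion never reaches its base case
-- and Python raises RecursionError: for b > 1 the call terminates iff at some depth k the
-- running value lands in the base interval, i.e. L_k ≤ t ≤ R_k with L_k = (b^(k+2)-b)/(b-1)
-- and R_k = (2b-1)(b^(k+1)-1)/(b-1) (stated below multiplied through by b-1 > 0); the bound
-- k ≤ log2 |t| is not a size cap: a terminating run's depth k satisfies b^(k+1) ≤ t with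
-- b ≥ 2, hence k ≤ log2 t, so every input A returns on satisfies Pre_rec.
def Pre_rec (t : Int) (b : Int) : Prop :=
  b ≤ 1 ∨ ∃ k : Nat, k ≤ t.natAbs.log2 ∧
    b ^ (k + 2) - b ≤ t * (b - 1) ∧ t * (b - 1) ≤ (2 * b - 1) * (b ^ (k + 1) - 1)
instance (t : Int) (b : Int) : Decidable (Pre_rec t b) := by unfold Pre_rec; infer_instance

def pvWitness_rec : Int × Int := (6, 2)

def Spec_rec (t : Int) (b : Int) (out : Int) : Prop := out = rec_alt t b
instance (t : Int) (b : Int) (out : Int) : Decidable (Spec_rec t b out) := by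
  unfold Spec_rec; infer_instance

-- ===== CLAIM (what is proved, stated in full; the proofs are below) =====
def Claim_equal_rec : Prop := ∀ (t : Int) (b : Int), Dom_rec t b → Pre_rec t b → Spec_rec t b (rec t b)

-- ===== LEMMAS AND PROOFS =====

-- a fold building a pair whose components do not interact is the pair of the folds
theorem foldl_pair_split (c : Int) :
    ∀ (l : List Int) (a b : Int),
      l.foldl (fun (p : Int × Int) i => (p.1 * (c + i), p.2 * i)) (a, b) =
        (l.foldl (fun r i => r * (c + i)) a, l.foldl (fun r i => r * i) b) := by
  intro l
  induction l with
  | nil => intro a b; simp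
  | cons x xs ih => intro a b; simp [List.foldl_cons, ih]

-- multiplying by each element of range(1, k+1) equals multiplying by each of range(2, k+1)
theorem foldl_mul_one_two (k : Int) :
    (PySem.List.pyRange 1 (k + 1) 1).foldl (fun r i => r * i) 1 =
      (PySem.List.pyRange 2 (k + 1) 1).foldl (fun r i => r * i) 1 := by
  by_cases hk : k ≤ 0
  · rw [PySem.List.pyRange_one_eq_nil (by omega), PySem.List.pyRange_one_eq_nil (by omega)]
  · rw [PySem.List.pyRange_one_cons (by omega)]
    simp

-- the shifted product over range(1, k+1) of (n-k+i) equals the product over range(n-k+1, n+1)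
theorem foldl_mul_shift (n k : Int) :
    (PySem.List.pyRange 1 (k + 1) 1).foldl (fun r i => r * (n - k + i)) 1 =
      (PySem.List.pyRange (n - k + 1) (n + 1) 1).foldl (fun r i => r * i) 1 := by
  rw [PySem.List.pyRange_one, PySem.List.pyRange_one]
  have hlen : (k + 1 - 1).toNat = (n + 1 - (n - k + 1)).toNat := by omega
  rw [List.foldl_map, List.foldl_map, hlen]
  have hf : (fun (r : Int) (x : Nat) => r * (n - k + (1 + (x : Int)))) =
      fun (r : Int) (x : Nat) => r * (n - k + 1 + (x : Int)) := by
    funext r x; ring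
  rw [hf]

theorem choose_eq (n k : Int) : chooseB n k = cbin n k := by
  simp only [chooseB, cbin]
  generalize (if k > PySem.Int.floordiv n 2 then n - k else k) = m
  rw [foldl_pair_split (n - m), foldl_mul_shift n m, foldl_mul_one_two m]

-- a fold that multiplies a constant once per list element is a power
theorem foldl_mul_const_pow (c : Int) :
    ∀ (l : List Int) (s : Int), l.foldl (fun r _ => r * c) s = s * c ^ l.length := by
  intro l
  induction l with
  | nil => intro s; simp
  | cons x xs ih => intro s; simp [List.foldl_cons, ih, pow_succ]; ring

theorem recFuel_eq_chainB (fuel : Nat) :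
    ∀ (t b : Int), 1 < b →
      recFuel fuel t b =
        (chainB fuel t b).1.reverse.foldl
          (fun res c => c ^ (b - 1).toNat * res ^ b.toNat) (chainB fuel t b).2 := by
  induction fuel with
  | zero => intro t b _; simp [recFuel, chainB]
  | succ fuel ih =>
    intro t b hb
    rw [recFuel, chainB]
    simp only [if_pos hb]
    by_cases hdif : PySem.Int.floordiv t b = 1
    · simp [hdif]
    · simp only [if_neg hdif]
      rw [foldl_mul_const_pow, one_mul, PySem.List.length_pyRange_one]
      simp only [List.reverse_cons, List.foldl_append, List.foldl_cons, List.foldl_nil]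
      rw [← ih (PySem.Int.floordiv t b - 1) b hb, choose_eq]
      simp

-- ===== VERDICT (by name: the statement is the Claim_ definition above) =====
theorem rec_spec : Claim_equal_rec := by
  intro t b _ _
  unfold Spec_rec rec rec_alt
  by_cases hb : b ≤ 1
  · rw [if_pos hb, recFuel, if_neg (by omega)]
  · rw [if_neg hb]
    exact recFuel_eq_chainB 64 t b (by omega)
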